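-- pv_equiv track=rewrite | github.com/mababou91430/ProjetAutomate | main.py | est_standard
-- ===== SOURCE A (Python) =====
-- import copy
--
-- def est_standard(data1, fichier_choisi):
--     """
--     Vérifie si l'automate dont le tableau (data) est mis en paramètre est standardisé
--     Retourne True si il est standadisé et False si ce n'est pas le cas
--     """
--     data = copy.deepcopy(data1)
--     entre = None
--     nb_entres = 0
--     for i in range (0, len(data)):
--         if data[i][0]=="E" or data[i][0]=="E/S":
--             entre = data[i][1]
--             nb_entres += 1
--     if nb_entres > 1 :
--         return False
--     for i in range (0, len(data)):
--         for j in data[i][2:]: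
--             if entre in j.split(","):
--                 return False
--     return True
-- ===== SOURCE B (Python) =====
-- def est_standard(data1, fichier_choisi):
--     """
--     Vérifie si l'automate dont le tableau (data) est mis en paramètre est standardisé
--     Retourne True si il est standadisé et False si ce n'est pas le cas
--     """
--     # Single fused pass: accumulate the entry count, the (last) entry state and the
--     # full list of destination labels; the verdict is one closed-form boolean at the end.
--     entre = None
--     nb_entres = 0
--     cibles = []
--     for row in data1:
--         for cell in row[2:]:
--             cibles.extend(cell.split(","))
--         if row[0] == "E" or row[0] == "E/S":
--             entre = row[1]
--             nb_entres += 1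
--     return nb_entres <= 1 and entre not in cibles
-- ===== Notes on version B (the rewrite author's own statement) =====
-- stated objective: alternative
-- what changed: Replaces A's two staged index loops with early returns (count entries, then nested scan returning False on first inbound hit) by one fused pass that accumulates entry count, entry state and the complete list of destination labels, deciding the result with a single closed-form boolean at the end; the deepcopy is dropped.
import Mathlib
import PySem

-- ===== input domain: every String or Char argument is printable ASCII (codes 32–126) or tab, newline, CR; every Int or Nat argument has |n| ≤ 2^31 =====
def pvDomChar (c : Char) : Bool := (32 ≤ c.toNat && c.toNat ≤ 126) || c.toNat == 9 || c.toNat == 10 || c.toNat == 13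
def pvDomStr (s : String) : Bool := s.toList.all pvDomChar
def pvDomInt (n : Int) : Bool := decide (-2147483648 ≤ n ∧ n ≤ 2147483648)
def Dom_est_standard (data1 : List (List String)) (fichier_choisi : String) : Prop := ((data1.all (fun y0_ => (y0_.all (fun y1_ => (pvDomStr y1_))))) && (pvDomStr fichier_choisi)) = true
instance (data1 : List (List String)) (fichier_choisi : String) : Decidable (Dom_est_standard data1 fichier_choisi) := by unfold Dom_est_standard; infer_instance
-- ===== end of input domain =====

-- B replaces A's two staged loops with early returns by one fused accumulator pass deciding the
-- result with a single closed-form boolean at the end; the deepcopy is dropped (objective: alternative).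

-- ===== PORT A =====
-- first loop of A: if row[0] is "E" or "E/S", set entre := row[1] and bump the counter
def estStdLoopA (data : List (List String)) : Option String × Nat :=
  data.foldl
    (fun st row =>
      if row.headD "" == "E" || row.headD "" == "E/S" then (some (row.getD 1 ""), st.2 + 1) else st)
    (none, 0)

def est_standard (data1 : List (List String)) (fichier_choisi : String) : Bool :=
  let st := estStdLoopA data1
  if st.2 > 1 then false
  else
    -- second loop: early return False as soon as `entre` occurs in some cell of row[2:]
    !(data1.any (fun row =>
        (PySem.List.slice row (some 2) none).any (fun j =>
          match st.1 with
          | some e => ((PySem.Str.split? j ",").getD []).contains e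
          | none => false)))

-- ===== PORT B =====
def est_standard_alt (data1 : List (List String)) (fichier_choisi : String) : Bool :=
  -- single fused pass: state = (entre, nb_entres, cibles)
  let st := data1.foldl
    (fun st row =>
      let cibles := st.2.2 ++
        (PySem.List.slice row (some 2) none).flatMap (fun cell => (PySem.Str.split? cell ",").getD [])
      if row.headD "" == "E" || row.headD "" == "E/S" then (some (row.getD 1 ""), st.2.1 + 1, cibles)
      else (st.1, st.2.1, cibles))
    ((none : Option String), (0 : Nat), ([] : List String))
  decide (st.2.1 ≤ 1) && !(match st.1 with | some e => st.2.2.contains e | none => false)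

-- ===== PRECONDITION & SPEC =====
-- Pre_ excludes exactly the inputs where Python A raises IndexError: a row that is empty
-- (data[i][0]) or an entry row of length 1 (data[i][1]).
def Pre_est_standard (data1 : List (List String)) (fichier_choisi : String) : Prop :=
  ∀ row ∈ data1, row ≠ [] ∧ ((row.headD "" = "E" ∨ row.headD "" = "E/S") → 2 ≤ row.length)
instance (data1 : List (List String)) (fichier_choisi : String) : Decidable (Pre_est_standard data1 fichier_choisi) := by unfold Pre_est_standard; infer_instance

def pvWitness_est_standard : List (List String) × String :=
  ([["E", "0", "1,2"], ["S", "1", "2"]], "t")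

def Spec_est_standard (data1 : List (List String)) (fichier_choisi : String) (out : Bool) : Prop := out = est_standard_alt data1 fichier_choisi
instance (data1 : List (List String)) (fichier_choisi : String) (out : Bool) : Decidable (Spec_est_standard data1 fichier_choisi out) := by unfold Spec_est_standard; infer_instance

-- ===== CLAIM (what is proved, stated in full; the proofs are below) =====
def Claim_equal_est_standard : Prop := ∀ (data1 : List (List String)) (fichier_choisi : String), Dom_est_standard data1 fichier_choisi → Pre_est_standard data1 fichier_choisi → Spec_est_standard data1 fichier_choisi (est_standard data1 fichier_choisi)

-- ===== LEMMAS AND PROOFS =====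

-- all destination labels of a list of rows
def estStdParts (rows : List (List String)) : List String :=
  rows.flatMap (fun row =>
    (PySem.List.slice row (some 2) none).flatMap (fun cell => (PySem.Str.split? cell ",").getD []))

-- B's fused fold splits into A's (entre, count) fold plus the accumulated label list
theorem estStdFoldB_eq (rows : List (List String)) :
    ∀ (e0 : Option String) (n0 : Nat) (ts : List String),
      rows.foldl
        (fun st row =>
          let cibles := st.2.2 ++
            (PySem.List.slice row (some 2) none).flatMap (fun cell => (PySem.Str.split? cell ",").getD [])
          if row.headD "" == "E" || row.headD "" == "E/S" then (some (row.getD 1 ""), st.2.1 + 1, cibles)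
          else (st.1, st.2.1, cibles))
        (e0, n0, ts)
      = ((rows.foldl
            (fun st row =>
              if row.headD "" == "E" || row.headD "" == "E/S" then (some (row.getD 1 ""), st.2 + 1) else st)
            (e0, n0)).1,
         (rows.foldl
            (fun st row =>
              if row.headD "" == "E" || row.headD "" == "E/S" then (some (row.getD 1 ""), st.2 + 1) else st)
            (e0, n0)).2,
         ts ++ estStdParts rows) := by
  induction rows with
  | nil => intro e0 n0 ts; simp [estStdParts]
  | cons row rest ih =>
    intro e0 n0 ts
    simp only [List.foldl_cons]
    by_cases h : (row.headD "" == "E" || row.headD "" == "E/S") = true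
    · simp only [h, if_pos, ih, estStdParts, List.flatMap_cons, List.append_assoc]
    · simp only [h, if_neg, Bool.false_eq_true, not_false_eq_true, ih, estStdParts,
        List.flatMap_cons, List.append_assoc]

-- ===== VERDICT (by name: the statement is the Claim_ definition above) =====
theorem est_standard_spec : Claim_equal_est_standard := by
  intro data1 fc _dom _pre
  unfold Spec_est_standard est_standard est_standard_alt estStdLoopA
  rw [estStdFoldB_eq]
  set st := data1.foldl
      (fun st row =>
        if row.headD "" == "E" || row.headD "" == "E/S" then (some (row.getD 1 ""), st.2 + 1) else st)
      ((none : Option String), (0 : Nat)) with hst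
  by_cases h : st.2 > 1
  · rw [if_pos h]
    have : ¬ st.2 ≤ 1 := by omega
    simp [this]
  · rw [if_neg h]
    have h1 : st.2 ≤ 1 := by omega
    simp only [h1, decide_true, Bool.true_and]
    congr 1
    cases he : st.1 with
    | none => simp
    | some e =>
      rw [Bool.eq_iff_iff]
      simp [estStdParts, List.any_eq_true, List.mem_flatMap]
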